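-- pv_equiv track=rewrite | github.com/khloe1425/luyenthihsgioi | KhanhHoa_2324/Bai4/SNTOTD.py | is_complete_prime
-- ===== SOURCE A (Python) =====
-- def is_prime(n):
--     if n <= 1:
--         return False
--     if n <= 3:
--         return True
--     if n % 2 == 0 or n % 3 == 0:
--         return False
--     i = 5
--     while i * i <= n:
--         if n % i == 0 or n % (i + 2) == 0:
--             return False
--         i += 6
--     return True
--
-- def is_complete_prime(x):
--     # Kiểm tra x có phải là số nguyên tố
--     if not is_prime(x):
--         return False
--
--     # Kiểm tra loại bỏ các chữ số bên phải
--     temp = x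
--     while temp > 0:
--         if not is_prime(temp):
--             return False
--         temp //= 10  # Bỏ chữ số bên phải
--
--     # Kiểm tra thêm các chữ số từ 0 đến 9 vào bên phải
--     for d in range(10):
--         if is_prime(x * 10 + d):
--             return True  # Nếu có ít nhất 1 số nguyên tố, x là số nguyên tố toàn diện
--     return False
-- ===== SOURCE B (Python) =====
-- def _prime(n):
--     if n < 2:
--         return False
--     i = 2
--     while i * i <= n:
--         if n % i == 0:
--             return False
--         i += 1
--     return True
--
-- def is_complete_prime(x):
--     if x <= 1:
--         return False
--     p = 0
--     for c in str(x):
--         p = 10 * p + ord(c) - 48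
--         if not _prime(p):
--             return False
--     return any(_prime(10 * x + d) for d in range(10))
-- ===== Notes on version B (the rewrite author's own statement) =====
-- stated objective: alternative
-- what changed: B replaces A's 6k±1 wheel primality test with plain step-1 trial division and replaces A's separate is_prime(x) check plus integer right-truncation (//=10) loop with a single left-to-right Horner pass over str(x) that checks every decimal prefix (x itself included); the extension check becomes an any() over digits.
import Mathlib
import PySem

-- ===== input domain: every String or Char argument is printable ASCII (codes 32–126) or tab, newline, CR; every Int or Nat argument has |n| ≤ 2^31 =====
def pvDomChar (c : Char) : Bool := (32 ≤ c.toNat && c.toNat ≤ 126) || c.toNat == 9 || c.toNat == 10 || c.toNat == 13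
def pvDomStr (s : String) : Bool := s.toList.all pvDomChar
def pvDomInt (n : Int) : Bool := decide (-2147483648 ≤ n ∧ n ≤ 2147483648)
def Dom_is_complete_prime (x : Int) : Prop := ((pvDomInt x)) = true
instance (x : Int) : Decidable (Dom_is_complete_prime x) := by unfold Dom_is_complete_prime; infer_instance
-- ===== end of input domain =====

-- B re-implements the same predicate by a different decomposition: a step-1 trial-division
-- primality test (instead of A's 6k±1 wheel), and a single left-to-right Horner pass over the
-- decimal string of x checking every decimal prefix (which covers x itself), instead of A's
-- separate is_prime(x) check plus right-truncation division loop.  Objective: alternative.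

-- ===== PORT A =====

-- termination fact for the trial loops: i ≤ i*i for every integer
theorem pv_le_mul_self (i : Int) : i ≤ i * i := by nlinarith [sq_nonneg (i - 1), sq_nonneg i]

-- while i*i <= n: if n % i == 0 or n % (i+2) == 0: return False; i += 6
def pvWheelLoop (n i : Int) : Bool :=
  if _h : i * i ≤ n then
    if PySem.Int.mod n i = 0 ∨ PySem.Int.mod n (i + 2) = 0 then false
    else pvWheelLoop n (i + 6)
  else true
termination_by (n + 1 - i).toNat
decreasing_by
  have := pv_le_mul_self i
  omega

def pvIsPrimeA (n : Int) : Bool :=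
  if n ≤ 1 then false
  else if n ≤ 3 then true
  else if PySem.Int.mod n 2 = 0 ∨ PySem.Int.mod n 3 = 0 then false
  else pvWheelLoop n 5

-- while temp > 0: if not is_prime(temp): return False; temp //= 10
def pvTruncA (temp : Int) : Bool :=
  if _h : temp > 0 then
    if !pvIsPrimeA temp then false
    else pvTruncA (PySem.Int.floordiv temp 10)
  else true
termination_by temp.toNat
decreasing_by
  rw [PySem.Int.floordiv_eq_ediv_of_pos (by omega : (0:Int) < 10)]
  omega

def is_complete_prime (x : Int) : Bool :=
  if !pvIsPrimeA x then false
  else if !pvTruncA x then false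
  else (PySem.List.pyRange 0 10 1).any fun d => pvIsPrimeA (x * 10 + d)

-- ===== PORT B =====

-- while i*i <= n: if n % i == 0: return False; i += 1
def pvTrialLoop (n i : Int) : Bool :=
  if _h : i * i ≤ n then
    if PySem.Int.mod n i = 0 then false
    else pvTrialLoop n (i + 1)
  else true
termination_by (n + 1 - i).toNat
decreasing_by
  have := pv_le_mul_self i
  omega

def pvIsPrimeB (n : Int) : Bool :=
  if n < 2 then false else pvTrialLoop n 2

-- for c in str(x): p = 10*p + ord(c) - 48; if not _prime(p): return False
-- (ord(c) is ported as Char.toNat, exact: both are the code point)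
def pvPrefixLoop (cs : List Char) (p : Int) : Bool :=
  match cs with
  | [] => true
  | c :: rest =>
    let p' := 10 * p + (c.toNat : Int) - 48
    if !pvIsPrimeB p' then false
    else pvPrefixLoop rest p'

def is_complete_prime_alt (x : Int) : Bool :=
  if x ≤ 1 then false
  else if !pvPrefixLoop (PySem.Int.toChars x) 0 then false
  else (PySem.List.pyRange 0 10 1).any fun d => pvIsPrimeB (10 * x + d)

-- ===== PRECONDITION & SPEC =====
def Spec_is_complete_prime (x : Int) (out : Bool) : Prop := out = is_complete_prime_alt x
instance (x : Int) (out : Bool) : Decidable (Spec_is_complete_prime x out) := by unfold Spec_is_complete_prime; infer_instance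

-- ===== CLAIM (what is proved, stated in full; the proofs are below) =====
def Claim_equal_is_complete_prime : Prop := ∀ (x : Int), Dom_is_complete_prime x → Spec_is_complete_prime x (is_complete_prime x)

-- ===== LEMMAS AND PROOFS =====

-- (1) Both primality loops are characterised by "no divisor j with j*j ≤ n".

theorem pvTrialLoop_iff (n : Int) : ∀ i, 2 ≤ i →
    (pvTrialLoop n i = true ↔ ∀ j, i ≤ j → j * j ≤ n → ¬ (j ∣ n)) := by
  intro i
  induction i using pvTrialLoop.induct (n := n) with
  | case1 i h hm =>
    intro _
    rw [pvTrialLoop]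
    simp only [dif_pos h, if_pos hm, Bool.false_eq_true, false_iff]
    push Not
    exact ⟨i, le_rfl, h, (PySem.Int.mod_eq_zero_iff_dvd n i).mp hm⟩
  | case2 i h hm ih =>
    intro h2
    rw [pvTrialLoop]
    simp only [dif_pos h, if_neg hm]
    rw [ih (by omega)]
    constructor
    · intro hall j hij hsq
      rcases eq_or_lt_of_le hij with rfl | hlt
      · exact fun hd => hm ((PySem.Int.mod_eq_zero_iff_dvd n _).mpr hd)
      · exact hall j (by omega) hsq
    · intro hall j hij hsq
      exact hall j (by omega) hsq
  | case3 i h =>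
    intro h2
    rw [pvTrialLoop]
    simp only [dif_neg h, true_iff]
    intro j hij hsq _
    have : i * i ≤ j * j := mul_le_mul hij hij (by omega) (by omega)
    omega

theorem pvWheelLoop_false (n j : Int) (hsq : j * j ≤ n) (hdvd : j ∣ n)
    (hjm : j % 6 = 1 ∨ j % 6 = 5) :
    ∀ i, 5 ≤ i → i % 6 = 5 → i ≤ j → pvWheelLoop n i = false := by
  intro i
  induction i using pvWheelLoop.induct (n := n) with
  | case1 i h hc =>
    intro _ _ _
    rw [pvWheelLoop]
    simp [dif_pos h, if_pos hc]
  | case2 i h hc ih =>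
    intro hi5 him hij
    rw [pvWheelLoop]
    simp only [dif_pos h, if_neg hc]
    have h1 : ¬ (i ∣ n) := fun hd => hc (Or.inl ((PySem.Int.mod_eq_zero_iff_dvd n i).mpr hd))
    have h2 : ¬ ((i + 2) ∣ n) := fun hd => hc (Or.inr ((PySem.Int.mod_eq_zero_iff_dvd n (i + 2)).mpr hd))
    have hne1 : j ≠ i := fun e => h1 (e ▸ hdvd)
    have hne2 : j ≠ i + 2 := fun e => h2 (e ▸ hdvd)
    exact ih (by omega) (by omega) (by omega)
  | case3 i h =>
    intro hi5 _ hij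
    have : i * i ≤ j * j := mul_le_mul hij hij (by omega) (by omega)
    omega

theorem pvWheelLoop_true (n : Int) (hall : ∀ j, 2 ≤ j → j * j ≤ n → ¬ (j ∣ n)) :
    ∀ i, 5 ≤ i → pvWheelLoop n i = true := by
  intro i
  induction i using pvWheelLoop.induct (n := n) with
  | case1 i h hc =>
    intro hi5
    exfalso
    rcases hc with hc | hc
    · exact hall i (by omega) h ((PySem.Int.mod_eq_zero_iff_dvd n i).mp hc)
    · have hd : (i + 2) ∣ n := (PySem.Int.mod_eq_zero_iff_dvd n (i + 2)).mp hc
      by_cases hs : (i + 2) * (i + 2) ≤ n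
      · exact hall (i + 2) (by omega) hs hd
      · obtain ⟨c, hcn⟩ := hd
        have hn0 : 0 < n := by nlinarith
        have hc0 : 0 < c := by nlinarith
        have hc1 : c ≠ 1 := by intro e; subst e; nlinarith
        have hci : c < i + 2 := by nlinarith
        have hcc : c * c ≤ n := by nlinarith
        exact hall c (by omega) hcc ⟨i + 2, by linarith [hcn, mul_comm (i + 2) c]⟩
  | case2 i h hc ih =>
    intro hi5
    rw [pvWheelLoop]
    simp only [dif_pos h, if_neg hc]
    exact ih (by omega)
  | case3 i h =>
    intro _
    rw [pvWheelLoop]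
    simp [dif_neg h]

theorem pvIsPrime_eq (n : Int) : pvIsPrimeA n = pvIsPrimeB n := by
  unfold pvIsPrimeA pvIsPrimeB
  by_cases h1 : n ≤ 1
  · simp [h1, show n < 2 by omega]
  by_cases h3 : n ≤ 3
  · rw [if_neg h1, if_pos h3, if_neg (show ¬ n < 2 by omega), pvTrialLoop,
      dif_neg (show ¬ (2 * 2 : Int) ≤ n by omega)]
  rw [if_neg h1, if_neg h3, if_neg (show ¬ n < 2 by omega)]
  by_cases h23 : PySem.Int.mod n 2 = 0 ∨ PySem.Int.mod n 3 = 0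
  · rw [if_pos h23]
    cases hB : pvTrialLoop n 2
    · rfl
    · exfalso
      have hall := (pvTrialLoop_iff n 2 (by omega)).mp hB
      rcases h23 with hc | hc
      · exact hall 2 (by omega) (by omega) ((PySem.Int.mod_eq_zero_iff_dvd n 2).mp hc)
      · have hd3 : (3 : Int) ∣ n := (PySem.Int.mod_eq_zero_iff_dvd n 3).mp hc
        by_cases hd2 : (2 : Int) ∣ n
        · exact hall 2 (by omega) (by omega) hd2
        · exact hall 3 (by omega) (by omega) hd3
  · rw [if_neg h23]
    push Not at h23
    have h2 : ¬ ((2 : Int) ∣ n) := fun hd => h23.1 ((PySem.Int.mod_eq_zero_iff_dvd n 2).mpr hd)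
    have hdn3 : ¬ ((3 : Int) ∣ n) := fun hd => h23.2 ((PySem.Int.mod_eq_zero_iff_dvd n 3).mpr hd)
    by_cases hnd : ∀ j, 2 ≤ j → j * j ≤ n → ¬ (j ∣ n)
    · rw [pvWheelLoop_true n hnd 5 (by omega), (pvTrialLoop_iff n 2 (by omega)).mpr
        (fun j hj hsq => hnd j (by omega) hsq)]
    · push Not at hnd
      obtain ⟨j, hj2, hsq, hdvd⟩ := hnd
      have hj2' : ¬ ((2 : Int) ∣ j) := fun hd => h2 (hd.trans hdvd)
      have hj3' : ¬ ((3 : Int) ∣ j) := fun hd => hdn3 (hd.trans hdvd)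
      have hW := pvWheelLoop_false n j hsq hdvd (by omega) 5 (by omega) (by omega) (by omega)
      rw [hW]
      cases hB : pvTrialLoop n 2
      · rfl
      · exact absurd hdvd ((pvTrialLoop_iff n 2 (by omega)).mp hB j (by omega) hsq)

-- (2) The Horner prefix pass equals A's right-truncation loop.

def pvHorner (p : Int) (cs : List Char) : Int :=
  cs.foldl (fun a c => 10 * a + (c.toNat : Int) - 48) p

theorem pvPrefixLoop_append (ds es : List Char) : ∀ p,
    pvPrefixLoop (ds ++ es) p = (pvPrefixLoop ds p && pvPrefixLoop es (pvHorner p ds)) := by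
  induction ds with
  | nil => intro p; simp [pvPrefixLoop, pvHorner]
  | cons c ds ih =>
    intro p
    simp only [List.cons_append, pvPrefixLoop, pvHorner, List.foldl_cons]
    cases hp : pvIsPrimeB (10 * p + (c.toNat : Int) - 48)
    · simp
    · simp only [Bool.not_true, Bool.false_eq_true, if_false]
      exact ih _

theorem pvToDigitsCore_acc (f : Nat) : ∀ n acc,
    Nat.toDigitsCore 10 f n acc = Nat.toDigitsCore 10 f n [] ++ acc := by
  induction f with
  | zero => intro n acc; simp [Nat.toDigitsCore]
  | succ f ih =>
    intro n acc
    simp only [Nat.toDigitsCore]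
    by_cases h : n / 10 = 0
    · simp [h]
    · rw [if_neg h, if_neg h, ih (n / 10) ((n % 10).digitChar :: acc),
        ih (n / 10) [(n % 10).digitChar]]
      simp

theorem pvToDigitsCore_fuel (n : Nat) : ∀ f acc, n < f →
    Nat.toDigitsCore 10 f n acc = Nat.toDigitsCore 10 (n + 1) n acc := by
  induction n using Nat.strong_induction_on with
  | _ n ih =>
    intro f acc hf
    match f, hf with
    | f + 1, _ =>
      simp only [Nat.toDigitsCore]
      by_cases h : n / 10 = 0
      · simp [h]
      · rw [if_neg h, if_neg h,
          ih (n / 10) (by omega) f _ (by omega),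
          ih (n / 10) (by omega) n _ (by omega)]

theorem pvToDigits_split (n : Nat) (h : 10 ≤ n) :
    Nat.toDigits 10 n = Nat.toDigits 10 (n / 10) ++ [Nat.digitChar (n % 10)] := by
  unfold Nat.toDigits
  show Nat.toDigitsCore 10 (n + 1) n [] = _
  rw [show n + 1 = (n) + 1 from rfl]
  simp only [Nat.toDigitsCore]
  rw [if_neg (by omega : ¬ n / 10 = 0),
    pvToDigitsCore_acc n (n / 10) [(n % 10).digitChar],
    pvToDigitsCore_fuel (n / 10) n [] (by omega)]
  simp only [Nat.toDigitsCore]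

theorem pvToDigits_small (n : Nat) (h : n < 10) :
    Nat.toDigits 10 n = [Nat.digitChar n] := by
  unfold Nat.toDigits
  show Nat.toDigitsCore 10 (n + 1) n [] = _
  simp only [Nat.toDigitsCore]
  rw [if_pos (by omega : n / 10 = 0), Nat.mod_eq_of_lt h]

theorem pvDigitChar_val (m : Nat) (h : m < 10) : ((Nat.digitChar m).toNat : Int) = m + 48 := by
  interval_cases m <;> decide

theorem pvHorner_toDigits (n : Nat) : pvHorner 0 (Nat.toDigits 10 n) = n := by
  induction n using Nat.strong_induction_on with
  | _ n ih =>
    by_cases h : n < 10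
    · rw [pvToDigits_small n h]
      simp [pvHorner, pvDigitChar_val n h]
    · rw [pvToDigits_split n (by omega)]
      unfold pvHorner
      rw [List.foldl_append]
      have hrec := ih (n / 10) (by omega)
      unfold pvHorner at hrec
      rw [hrec]
      simp only [List.foldl_cons, List.foldl_nil,
        pvDigitChar_val (n % 10) (by omega)]
      have h1 : (10 : Int) * ((n : Int) / 10) + (n : Int) % 10 = n := by omega
      push_cast
      omega

theorem pvPrefix_eq_trunc (n : Nat) (hn : 0 < n) :
    pvPrefixLoop (Nat.toDigits 10 n) 0 = pvTruncA (n : Int) := by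
  induction n using Nat.strong_induction_on with
  | _ n ih =>
    by_cases h : n < 10
    · rw [pvToDigits_small n h]
      rw [pvTruncA, dif_pos (by exact_mod_cast hn)]
      have hdiv : PySem.Int.floordiv (n : Int) 10 = ((n / 10 : Nat) : Int) := by
        exact_mod_cast PySem.Int.floordiv_natCast n 10
      rw [hdiv, show n / 10 = 0 by omega]
      have hval : 10 * (0 : Int) + ((Nat.digitChar n).toNat : Int) - 48 = (n : Int) := by
        rw [pvDigitChar_val n h]; omega
      simp only [pvPrefixLoop, hval, pvIsPrime_eq]
      cases hp : pvIsPrimeB (n : Int)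
      · simp
      · simp [pvTruncA]
    · rw [pvToDigits_split n (by omega), pvPrefixLoop_append, pvHorner_toDigits]
      have hval : 10 * ((n / 10 : Nat) : Int) + ((Nat.digitChar (n % 10)).toNat : Int) - 48
          = (n : Int) := by
        rw [pvDigitChar_val (n % 10) (by omega)]
        push_cast
        omega
      have hone : pvPrefixLoop [Nat.digitChar (n % 10)] ((n / 10 : Nat) : Int)
          = pvIsPrimeB (n : Int) := by
        simp only [pvPrefixLoop, hval]
        cases hp : pvIsPrimeB (n : Int) <;> simp
      have hdiv : PySem.Int.floordiv (n : Int) 10 = ((n / 10 : Nat) : Int) := by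
        exact_mod_cast PySem.Int.floordiv_natCast n 10
      have hR : pvTruncA (n : Int)
          = (pvIsPrimeA (n : Int) && pvTruncA ((n / 10 : Nat) : Int)) := by
        rw [pvTruncA, dif_pos (by exact_mod_cast hn : (n : Int) > 0), hdiv]
        cases hp : pvIsPrimeA (n : Int) <;> simp
      rw [hone, ih (n / 10) (by omega) (by omega), hR, pvIsPrime_eq, Bool.and_comm]

-- ===== VERDICT (by name: the statement is the Claim_ definition above) =====
theorem pvTruncA_prime (x : Int) (hx : 0 < x) (h : pvTruncA x = true) :
    pvIsPrimeA x = true := by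
  rw [pvTruncA, dif_pos hx] at h
  cases hp : pvIsPrimeA x
  · rw [hp] at h; simp at h
  · rfl

theorem is_complete_prime_spec : Claim_equal_is_complete_prime := by
  intro x _
  unfold Spec_is_complete_prime
  show is_complete_prime x = is_complete_prime_alt x
  by_cases hx : x ≤ 1
  · have hA : pvIsPrimeA x = false := by rw [pvIsPrimeA, if_pos hx]
    simp [is_complete_prime, is_complete_prime_alt, hA, hx]
  · have hx0 : 0 < x := by omega
    have hxn : x = ((x.toNat : Nat) : Int) := by omega
    have hchars : PySem.Int.toChars x = Nat.toDigits 10 x.toNat := by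
      simp [PySem.Int.toChars, show ¬ x < 0 by omega]
    have hM : pvPrefixLoop (PySem.Int.toChars x) 0 = pvTruncA x := by
      rw [hchars]
      calc pvPrefixLoop (Nat.toDigits 10 x.toNat) 0
          = pvTruncA ((x.toNat : Nat) : Int) := pvPrefix_eq_trunc x.toNat (by omega)
        _ = pvTruncA x := by rw [← hxn]
    have hAny : ((PySem.List.pyRange 0 10 1).any fun d => pvIsPrimeA (x * 10 + d))
        = ((PySem.List.pyRange 0 10 1).any fun d => pvIsPrimeB (10 * x + d)) := by
      congr 1
      funext d
      rw [mul_comm x 10, pvIsPrime_eq]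
    unfold is_complete_prime is_complete_prime_alt
    rw [hM, if_neg hx]
    cases hTr : pvTruncA x
    · cases hp : pvIsPrimeA x <;> simp [hp]
    · have hp := pvTruncA_prime x hx0 hTr
      simp [hp, hTr, hAny]
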